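-- pv_equiv track=rewrite | github.com/walkershashi/myCoders | HackerRank/Problem Solving/Algorithms/Funny String.py | funnyString
-- ===== SOURCE A (Python) =====
-- def funnyString(s):
--     ascii_s = []
--     ascii_rev_s = []
--     for i in range(len(s)-1):
--         ascii_s.append(abs(ord(s[i])-ord(s[i+1])))
--         ascii_rev_s.append(abs(ord(s[::-1][i])-ord(s[::-1][i+1])))
--
--     if ascii_s == ascii_rev_s:
--         return "Funny"
--     else:
--         return "Not Funny"
-- ===== SOURCE B (Python) =====
-- def funnyString(s):
--     # Two-pointer scan from both ends: compare the gap at the front (i, i+1)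
--     # with the gap at the back (j, j-1) directly on the string, no lists built,
--     # returning "Not Funny" at the first mismatch.
--     i, j = 0, len(s) - 1
--     while i + 1 < len(s):
--         if abs(ord(s[i]) - ord(s[i + 1])) != abs(ord(s[j]) - ord(s[j - 1])):
--             return "Not Funny"
--         i += 1
--         j -= 1
--     return "Funny"
-- ===== Notes on version B (the rewrite author's own statement) =====
-- stated objective: faster
-- what changed: B is a two-pointer scan comparing the front gap |s[i]-s[i+1]| against the back gap |s[j]-s[j-1]| directly on the string with early exit, building no lists, while A builds two gap lists (re-reversing the whole string every iteration) and compares them at the end.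
import Mathlib
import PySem

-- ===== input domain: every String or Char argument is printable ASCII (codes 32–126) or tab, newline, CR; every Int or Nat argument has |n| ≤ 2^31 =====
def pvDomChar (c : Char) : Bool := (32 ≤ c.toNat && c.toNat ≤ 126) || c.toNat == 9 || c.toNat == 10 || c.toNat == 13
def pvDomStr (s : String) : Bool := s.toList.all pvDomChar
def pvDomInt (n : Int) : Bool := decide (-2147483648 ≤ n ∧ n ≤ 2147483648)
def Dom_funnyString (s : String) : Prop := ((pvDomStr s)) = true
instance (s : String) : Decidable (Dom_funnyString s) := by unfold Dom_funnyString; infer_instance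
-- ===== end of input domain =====

-- ===== PORT A =====
-- One honest line: B replaces A's two materialised gap lists (A re-reverses the whole
-- string on every loop iteration) by a listless two-pointer scan with early exit (faster).
def funnyString (s : String) : String :=
  let cs := s.toList
  let p := (PySem.List.pyRange 0 ((cs.length : Int) - 1) 1).foldl
    (fun (acc : List Int × List Int) i =>
      (acc.1 ++ [|((PySem.List.pyGetD cs i ' ').toNat : Int) - ((PySem.List.pyGetD cs (i+1) ' ').toNat : Int)|],
       acc.2 ++
         [let rev := (PySem.List.slice? cs none none (-1)).getD [];
          |((PySem.List.pyGetD rev i ' ').toNat : Int) - ((PySem.List.pyGetD rev (i+1) ' ').toNat : Int)|]))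
    ([], [])
  if p.1 = p.2 then "Funny" else "Not Funny"

-- ===== PORT B =====
-- `while i + 1 < len(s)` runs exactly `len(s) - 1` times (pointers move in lockstep),
-- ported as structural recursion on that count; indices i, i+1, j, j-1 are always in
-- range there, so plain `getD` is exact.
def pvScan (cs : List Char) : Nat → Nat → Nat → String
  | _, _, 0 => "Funny"
  | i, j, Nat.succ k =>
    if |((cs.getD i ' ').toNat : Int) - ((cs.getD (i+1) ' ').toNat : Int)| ≠
       |((cs.getD j ' ').toNat : Int) - ((cs.getD (j-1) ' ').toNat : Int)|
    then "Not Funny"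
    else pvScan cs (i+1) (j-1) k

def funnyString_alt (s : String) : String :=
  pvScan s.toList 0 (s.toList.length - 1) (s.toList.length - 1)

-- ===== PRECONDITION & SPEC =====
def Spec_funnyString (s : String) (out : String) : Prop := out = funnyString_alt s
instance (s : String) (out : String) : Decidable (Spec_funnyString s out) := by unfold Spec_funnyString; infer_instance

-- ===== CLAIM (what is proved, stated in full; the proofs are below) =====
def Claim_equal_funnyString : Prop := ∀ (s : String), Dom_funnyString s → Spec_funnyString s (funnyString s)

-- ===== LEMMAS AND PROOFS =====

/-- The gap list of a character list (what A builds as `ascii_s`). -/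
def pvDiffs (l : List Char) : List Int :=
  (l.zip (l.drop 1)).map (fun p => |((p.1.toNat : Int)) - ((p.2.toNat : Int))|)

theorem pvDiffs_length (l : List Char) : (pvDiffs l).length = l.length - 1 := by
  simp [pvDiffs]

theorem pvDiffs_getElem (l : List Char) (k : Nat) (hk : k + 1 < l.length) :
    (pvDiffs l)[k]'(by rw [pvDiffs_length]; omega) =
      |((l[k]'(by omega)).toNat : Int) - ((l[k+1]'hk).toNat : Int)| := by
  simp [pvDiffs, List.getElem_zip]

/-- A's index-built gap list equals the zip-built gap list. -/
theorem pv_map_range_eq_diffs (l : List Char) :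
    (PySem.List.pyRange 0 ((l.length : Int) - 1) 1).map
      (fun i => |((PySem.List.pyGetD l i ' ').toNat : Int) - ((PySem.List.pyGetD l (i+1) ' ').toNat : Int)|)
    = pvDiffs l := by
  apply List.ext_getElem
  · simp [PySem.List.length_pyRange_one, pvDiffs_length]
  · intro k h1 h2
    have hk : k + 1 < l.length := by
      rw [pvDiffs_length] at h2; omega
    simp only [List.getElem_map, PySem.List.getElem_pyRange_one]
    have c1 : (0:Int) + (k:Int) = ((k:Nat):Int) := by omega
    have c2 : (0:Int) + (k:Int) + 1 = ((k+1:Nat):Int) := by omega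
    have e : ∀ (j : Nat) (hj : j < l.length), PySem.List.pyGetD l (j:Int) ' ' = l[j] := by
      intro j hj
      simp [List.getD_eq_getElem?_getD, List.getElem?_eq_getElem hj]
    rw [c2, c1, e k (by omega), e (k+1) hk, pvDiffs_getElem l k hk]

/-- Reversing the string reverses the gap list (gaps are symmetric under `abs`). -/
theorem pvDiffs_reverse (l : List Char) : pvDiffs l.reverse = (pvDiffs l).reverse := by
  apply List.ext_getElem
  · simp [pvDiffs_length]
  · intro k h1 h2
    have hn : k + 1 < l.length := by
      rw [pvDiffs_length, List.length_reverse] at h1; omega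
    rw [List.getElem_reverse]
    have hj : ((pvDiffs l).length - 1 - k) + 1 < l.length := by rw [pvDiffs_length]; omega
    rw [pvDiffs_getElem l.reverse k (by rw [List.length_reverse]; exact hn),
        pvDiffs_getElem l ((pvDiffs l).length - 1 - k) hj]
    rw [List.getElem_reverse, List.getElem_reverse]
    rw [getElem_congr rfl (show l.length - 1 - k = ((pvDiffs l).length - 1 - k) + 1 by rw [pvDiffs_length]; omega) (by omega),
        getElem_congr rfl (show l.length - 1 - (k+1) = (pvDiffs l).length - 1 - k by rw [pvDiffs_length]; omega) (by omega)]
    rw [abs_sub_comm]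

theorem pvScan_funny_or_not (cs : List Char) :
    ∀ k i j, pvScan cs i j k = "Funny" ∨ pvScan cs i j k = "Not Funny" := by
  intro k
  induction k with
  | zero => intro i j; left; rfl
  | succ k ih =>
    intro i j
    simp only [pvScan]
    split
    · right; rfl
    · exact ih (i+1) (j-1)

/-- Invariant of B's two-pointer loop: starting at front pointer `i` (back pointer
`n-1-i`), the scan says "Funny" iff every remaining gap matches its mirror gap. -/
theorem pvScan_iff (cs : List Char) :
    ∀ k i, i + k = cs.length - 1 →
      (pvScan cs i (cs.length - 1 - i) k = "Funny" ↔
        ∀ t, i ≤ t → t < cs.length - 1 →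
          (pvDiffs cs).getD t 0 = (pvDiffs cs).getD (cs.length - 1 - 1 - t) 0) := by
  intro k
  induction k with
  | zero =>
    intro i hi
    simp only [pvScan]
    constructor
    · intro _ t ht1 ht2; omega
    · intro _; trivial
  | succ k ih =>
    intro i hi
    have hn : i + 1 < cs.length := by omega
    have hdl : (pvDiffs cs).length = cs.length - 1 := pvDiffs_length cs
    have dgd : ∀ (t : Nat), t < cs.length - 1 →
        (pvDiffs cs).getD t 0 =
          |((cs.getD t ' ').toNat : Int) - ((cs.getD (t+1) ' ').toNat : Int)| := by
      intro t ht
      have h1 : t < cs.length := by omega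
      have h2 : t + 1 < cs.length := by omega
      rw [List.getD_eq_getElem?_getD, List.getElem?_eq_getElem (by omega : t < (pvDiffs cs).length)]
      simp only [Option.getD_some]
      rw [pvDiffs_getElem cs t h2]
      rw [List.getD_eq_getElem?_getD, List.getD_eq_getElem?_getD,
          List.getElem?_eq_getElem h1, List.getElem?_eq_getElem h2]
      simp only [Option.getD_some]
    -- the back gap compared at this step is the mirror gap d[n-2-i]
    have hback :
        |((cs.getD (cs.length - 1 - i) ' ').toNat : Int) - ((cs.getD (cs.length - 1 - i - 1) ' ').toNat : Int)|
          = (pvDiffs cs).getD (cs.length - 1 - 1 - i) 0 := by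
      rw [dgd (cs.length - 1 - 1 - i) (by omega), abs_sub_comm]
      rw [show cs.length - 1 - i - 1 = cs.length - 1 - 1 - i from by omega,
          show cs.length - 1 - i = (cs.length - 1 - 1 - i) + 1 from by omega]
    simp only [pvScan]
    split
    · rename_i hne
      constructor
      · intro h; exact absurd h (by decide)
      · intro h
        exfalso
        apply hne
        rw [hback, ← dgd i (by omega)]
        exact h i le_rfl (by omega)
    · rename_i heq
      push Not at heq
      have hstep : cs.length - 1 - (i+1) = cs.length - 1 - i - 1 := by omega
      rw [show cs.length - 1 - i - 1 = cs.length - 1 - (i+1) from hstep.symm]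
      rw [ih (i+1) (by omega)]
      constructor
      · intro h t ht1 ht2
        rcases Nat.eq_or_lt_of_le ht1 with h' | h'
        · rw [← h', dgd i (by omega), ← hback]
          exact heq
        · exact h t h' ht2
      · intro h t ht1 ht2
        exact h t (by omega) ht2

/-- The gap list is a palindrome iff every entry equals its mirror entry. -/
theorem pv_palindrome_iff (cs : List Char) :
    (pvDiffs cs = (pvDiffs cs).reverse ↔
      ∀ t, 0 ≤ t → t < cs.length - 1 →
        (pvDiffs cs).getD t 0 = (pvDiffs cs).getD (cs.length - 1 - 1 - t) 0) := by
  have hdl : (pvDiffs cs).length = cs.length - 1 := pvDiffs_length cs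
  constructor
  · intro h t _ ht
    conv_lhs => rw [h]
    rw [List.getD_eq_getElem?_getD, List.getD_eq_getElem?_getD,
        List.getElem?_eq_getElem (by simp [hdl]; omega : t < (pvDiffs cs).reverse.length),
        List.getElem?_eq_getElem (by omega : cs.length - 1 - 1 - t < (pvDiffs cs).length)]
    simp only [Option.getD_some, List.getElem_reverse]
    exact getElem_congr rfl (by omega) (by omega)
  · intro h
    apply List.ext_getElem
    · simp
    · intro k h1 h2
      have := h k (Nat.zero_le k) (by omega)
      rw [List.getD_eq_getElem?_getD, List.getD_eq_getElem?_getD,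
          List.getElem?_eq_getElem h1,
          List.getElem?_eq_getElem (by omega : cs.length - 1 - 1 - k < (pvDiffs cs).length)] at this
      simp only [Option.getD_some] at this
      rw [this, List.getElem_reverse]
      exact getElem_congr rfl (by omega) (by omega)

/-- A computes `if diffs = diffs.reverse then "Funny" else "Not Funny"`. -/
theorem pv_A_eq (s : String) :
    funnyString s = if pvDiffs s.toList = (pvDiffs s.toList).reverse then "Funny" else "Not Funny" := by
  unfold funnyString
  simp only [PySem.List.slice?_none_none_neg_one, Option.getD_some]
  have hfold := PySem.List.foldl_prod_mk
    (fun (a : List Int) (i : Int) =>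
      a ++ [|((PySem.List.pyGetD s.toList i ' ').toNat : Int) - ((PySem.List.pyGetD s.toList (i+1) ' ').toNat : Int)|])
    (fun (a : List Int) (i : Int) =>
      a ++ [|((PySem.List.pyGetD s.toList.reverse i ' ').toNat : Int) - ((PySem.List.pyGetD s.toList.reverse (i+1) ' ').toNat : Int)|])
    (PySem.List.pyRange 0 ((s.toList.length : Int) - 1) 1) [] []
  rw [show (List.foldl (fun (acc : List Int × List Int) i =>
        (acc.1 ++ [|((PySem.List.pyGetD s.toList i ' ').toNat : Int) - ((PySem.List.pyGetD s.toList (i+1) ' ').toNat : Int)|],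
         acc.2 ++ [|((PySem.List.pyGetD s.toList.reverse i ' ').toNat : Int) - ((PySem.List.pyGetD s.toList.reverse (i+1) ' ').toNat : Int)|]))
        ([], []) (PySem.List.pyRange 0 ((s.toList.length : Int) - 1) 1)) = _ from hfold]
  simp only [PySem.List.foldl_append_singleton_eq_map, List.nil_append]
  rw [pv_map_range_eq_diffs]
  have h := pv_map_range_eq_diffs s.toList.reverse
  rw [List.length_reverse] at h
  rw [h, pvDiffs_reverse]

-- ===== VERDICT (by name: the statement is the Claim_ definition above) =====
theorem funnyString_spec : Claim_equal_funnyString := by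
  intro s _
  unfold Spec_funnyString funnyString_alt
  rw [pv_A_eq s]
  have hiff := pvScan_iff s.toList (s.toList.length - 1) 0 (by omega)
  rw [show s.toList.length - 1 - 0 = s.toList.length - 1 from rfl] at hiff
  have hiff' : pvScan s.toList 0 (s.toList.length - 1) (s.toList.length - 1) = "Funny" ↔
      pvDiffs s.toList = (pvDiffs s.toList).reverse := by
    rw [hiff, pv_palindrome_iff s.toList]
  by_cases hp : pvDiffs s.toList = (pvDiffs s.toList).reverse
  · rw [if_pos hp]
    exact (hiff'.mpr hp).symm
  · rw [if_neg hp]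
    rcases pvScan_funny_or_not s.toList (s.toList.length - 1) 0 (s.toList.length - 1) with h | h
    · exact absurd (hiff'.mp h) hp
    · exact h.symm
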